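-- pv_equiv track=rewrite | github.com/mlz-ictrl/nicos | nicos/devices/vendor/ipc.py | crc_ipc
-- ===== SOURCE A (Python) =====
-- def crc_ipc(string):
--     crc = 255
--     for byte in string:
--         byte = ord(byte)
--         crc ^= byte
--         for _ in range(8):
--             temp = crc % 2
--             crc = int(crc / 2)
--             if temp != 0:
--                 crc ^= 0xA1
--     return '%03d' % crc
-- ===== SOURCE B (Python) =====
-- def _make_table():
--     tab = []
--     for i in range(256):
--         c = i
--         for _ in range(8):
--             t = c % 2
--             c //= 2
--             if t != 0:
--                 c ^= 0xA1
--         tab.append(c)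
--     return tab
--
-- _TABLE = _make_table()
--
-- def crc_ipc(string):
--     crc = 255
--     for byte in string:
--         crc = _TABLE[crc ^ ord(byte)]
--     return '%03d' % crc
-- ===== Notes on version B (the rewrite author's own statement) =====
-- stated objective: faster
-- what changed: B precomputes a 256-entry lookup table of the 8-round bit recurrence once, so the per-character work is a single XOR and table lookup instead of an 8-iteration bit loop.
import Mathlib
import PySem

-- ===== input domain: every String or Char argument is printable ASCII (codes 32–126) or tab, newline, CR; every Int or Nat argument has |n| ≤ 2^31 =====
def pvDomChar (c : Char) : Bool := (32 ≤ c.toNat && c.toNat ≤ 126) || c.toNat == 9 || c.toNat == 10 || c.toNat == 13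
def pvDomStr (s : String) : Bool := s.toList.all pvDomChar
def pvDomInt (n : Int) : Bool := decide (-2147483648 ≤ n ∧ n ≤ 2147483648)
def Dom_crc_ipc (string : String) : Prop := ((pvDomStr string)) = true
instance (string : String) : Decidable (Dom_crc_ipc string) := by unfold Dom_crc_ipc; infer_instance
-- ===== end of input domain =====

-- B replaces A's per-character 8-round bit loop by a precomputed 256-entry lookup table (faster by a constant factor).


-- shared by both ports: '%03d' % n for the nonnegative values both programs produce
def pvFmt3 (n : Int) : String :=
  let l := (PySem.Int.toStr n).toList
  String.ofList (List.replicate (3 - l.length) '0' ++ l)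

-- ===== PORT A =====
-- one pass of the inner 'for _ in range(8)' body; int(crc/2) = crc//2 since crc is nonnegative here
def crcRoundA (c : Int) : Int :=
  if PySem.Int.mod c 2 ≠ 0 then PySem.Int.bxor (PySem.Int.floordiv c 2) 0xA1
  else PySem.Int.floordiv c 2

def crc_ipc (string : String) : String :=
  pvFmt3 (string.toList.foldl
    (fun crc byte =>
      (List.range 8).foldl (fun c _ => crcRoundA c) (PySem.Int.bxor crc (byte.toNat : Int)))
    255)

-- ===== PORT B =====
-- the 256-entry table _TABLE of Source B, built by the same 8-round recurrence
def crcTable : List Int :=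
  (List.range 256).map (fun i =>
    (List.range 8).foldl (fun c _ =>
      if PySem.Int.mod c 2 ≠ 0 then PySem.Int.bxor (PySem.Int.floordiv c 2) 0xA1
      else PySem.Int.floordiv c 2) (Int.ofNat i))

def crc_ipc_alt (string : String) : String :=
  pvFmt3 (string.toList.foldl
    (fun crc byte =>
      (PySem.List.pyGet? crcTable (PySem.Int.bxor crc (byte.toNat : Int))).getD 0)
    255)

-- ===== PRECONDITION & SPEC =====
def Spec_crc_ipc (string : String) (out : String) : Prop := out = crc_ipc_alt string
instance (string : String) (out : String) : Decidable (Spec_crc_ipc string out) := by unfold Spec_crc_ipc; infer_instance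

-- ===== CLAIM (what is proved, stated in full; the proofs are below) =====
def Claim_equal_crc_ipc : Prop := ∀ (string : String), Dom_crc_ipc string → Spec_crc_ipc string (crc_ipc string)

-- ===== LEMMAS AND PROOFS =====

-- one round on a nonnegative value < 256, as a Nat computation
lemma crcRoundA_natCast (n : Nat) :
    crcRoundA (n : Int) = ((if n % 2 ≠ 0 then (n / 2) ^^^ 161 else n / 2 : Nat) : Int) := by
  unfold crcRoundA
  have hm : PySem.Int.mod (n : Int) 2 = ((n % 2 : Nat) : Int) := by
    rw [PySem.Int.mod_eq_emod_of_pos (by norm_num)]; omega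
  have hd : PySem.Int.floordiv (n : Int) 2 = ((n / 2 : Nat) : Int) := by
    rw [PySem.Int.floordiv_eq_ediv_of_pos (by norm_num)]; omega
  rw [hm, hd]
  by_cases h2 : n % 2 = 0
  · simp [h2]
  · have hne : ((n % 2 : Nat) : Int) ≠ 0 := by exact_mod_cast h2
    rw [if_pos hne, if_pos h2, show (0xA1 : Int) = ((161 : Nat) : Int) from rfl,
        PySem.Int.bxor_natCast]

lemma crcRoundA_bound (n : Nat) (h : n < 256) :
    ∃ m : Nat, m < 256 ∧ crcRoundA (n : Int) = (m : Int) := by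
  rw [crcRoundA_natCast n]
  refine ⟨_, ?_, rfl⟩
  split_ifs with h1
  · exact Nat.xor_lt_two_pow (n := 8) (by omega) (by norm_num)
  · omega

-- 8 rounds preserve the range [0, 256)
lemma roundsA_bound (L : List Nat) (n : Nat) (h : n < 256) :
    ∃ m : Nat, m < 256 ∧ L.foldl (fun c _ => crcRoundA c) (n : Int) = (m : Int) := by
  induction L generalizing n with
  | nil => exact ⟨n, h, rfl⟩
  | cons a L ih =>
    obtain ⟨m, hm, he⟩ := crcRoundA_bound n h
    simpa [he] using ih m hm

-- table lookup at an in-range index yields exactly A's 8-round result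
lemma crcTable_get (i : Nat) (h : i < 256) :
    (PySem.List.pyGet? crcTable ((i : Nat) : Int)).getD 0
      = (List.range 8).foldl (fun c _ => crcRoundA c) (i : Int) := by
  rw [PySem.List.pyGet?_natCast]
  unfold crcTable
  rw [List.getElem?_map, List.getElem?_range h]
  rfl

-- main fold equality under the invariant crc ∈ [0, 256) and all chars < 128
lemma fold_eq (l : List Char) (hl : ∀ ch ∈ l, ch.toNat < 128) (n : Nat) (hn : n < 256) :
    l.foldl (fun crc byte =>
        (List.range 8).foldl (fun c _ => crcRoundA c) (PySem.Int.bxor crc (byte.toNat : Int))) (n : Int)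
    = l.foldl (fun crc byte =>
        (PySem.List.pyGet? crcTable (PySem.Int.bxor crc (byte.toNat : Int))).getD 0) (n : Int) := by
  induction l generalizing n with
  | nil => rfl
  | cons ch l ih =>
    have hc : ch.toNat < 128 := hl ch (List.mem_cons_self ..)
    have hidx : n ^^^ ch.toNat < 256 :=
      Nat.xor_lt_two_pow (n := 8) (by omega) (by omega)
    have hx : PySem.Int.bxor (n : Int) ((ch.toNat : Nat) : Int) = ((n ^^^ ch.toNat : Nat) : Int) :=
      PySem.Int.bxor_natCast n ch.toNat
    obtain ⟨m, hm, he⟩ := roundsA_bound (List.range 8) (n ^^^ ch.toNat) hidx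
    simp only [List.foldl_cons, hx, he, crcTable_get _ hidx]
    exact ih (fun c hc' => hl c (List.mem_cons_of_mem _ hc')) m hm

-- ===== VERDICT (by name: the statement is the Claim_ definition above) =====
theorem crc_ipc_spec : Claim_equal_crc_ipc := by
  intro s hs
  unfold Spec_crc_ipc crc_ipc crc_ipc_alt
  have hl : ∀ ch ∈ s.toList, ch.toNat < 128 := by
    intro ch hch
    have := List.all_eq_true.mp hs ch hch
    simp [pvDomChar] at this
    omega
  have := fold_eq s.toList hl 255 (by omega)
  rw [show (255 : Int) = ((255 : Nat) : Int) from rfl, this]
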